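-- pv_equiv track=rewrite | github.com/fermingp/Pr-ctica-Bicimad | practica_bicimad.py | es_ciclo
-- ===== SOURCE A (Python) =====
-- def es_ciclo(data):
--     result = False
--     for i in range(len(data[1])):
--         j = i + 1
--         while j<len(data[1]) and not result:
--             result = data[1][i][0]==data[1][j][1]
--             j+=1
--     return result
-- ===== SOURCE B (Python) =====
-- def es_ciclo(data):
--     seen = set()
--     for f, s in data[1]:
--         if s in seen:
--             return True
--         seen.add(f)
--     return False
-- ===== Notes on version B (the rewrite author's own statement) =====
-- stated objective: alternative
-- what changed: Replaces the nested i<j index-pair scan over data[1] with a single left-to-right pass that keeps a set of first components already seen and stops as soon as some pair's second component is in that set.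
import Mathlib
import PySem

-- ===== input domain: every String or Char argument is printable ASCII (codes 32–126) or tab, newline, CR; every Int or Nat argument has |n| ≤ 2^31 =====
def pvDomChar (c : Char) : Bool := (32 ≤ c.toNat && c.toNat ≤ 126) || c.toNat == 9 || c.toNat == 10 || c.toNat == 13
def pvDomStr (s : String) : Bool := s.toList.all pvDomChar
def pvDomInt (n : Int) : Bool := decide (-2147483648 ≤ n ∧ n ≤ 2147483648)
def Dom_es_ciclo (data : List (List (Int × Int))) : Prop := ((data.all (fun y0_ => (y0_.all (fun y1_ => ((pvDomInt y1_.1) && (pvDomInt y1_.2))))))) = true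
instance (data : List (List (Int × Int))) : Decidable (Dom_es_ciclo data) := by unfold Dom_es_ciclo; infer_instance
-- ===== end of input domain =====

-- B replaces A's nested i<j index scan with one pass keeping a set of seen first components.
-- A raises IndexError when len(data) < 2 (and so does B); Pre_ excludes those inputs.

-- ===== PORT A =====
-- inner 'while j < len(data[1]) and not result: result = data[1][i][0]==data[1][j][1]; j += 1'
def esCicloInner (row : List (Int × Int)) (xi : Int) (j : Nat) (result : Bool) : Bool :=
  if h : j < row.length ∧ result = false then
    esCicloInner row xi (j + 1) (xi == (row.getD j (0, 0)).2)
  else result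
termination_by row.length - j
decreasing_by omega

def es_ciclo (data : List (List (Int × Int))) : Bool :=
  match PySem.List.pyGet? data 1 with
  | none => false   -- Python raises IndexError here; excluded by Pre_
  | some row =>
    (List.range row.length).foldl
      (fun result i => esCicloInner row ((row.getD i (0, 0)).1) (i + 1) result) false

-- ===== PORT B =====
def esCicloScan (seen : PySem.Set Int) : List (Int × Int) → Bool
  | [] => false
  | (f, s) :: rest =>
    if PySem.Set.contains seen s then true
    else esCicloScan (PySem.Set.add seen f) rest

def es_ciclo_alt (data : List (List (Int × Int))) : Bool :=
  match PySem.List.pyGet? data 1 with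
  | none => false   -- Python raises IndexError here; excluded by Pre_
  | some row => esCicloScan PySem.Set.empty row

-- ===== PRECONDITION & SPEC =====
-- Pre_: data[1] must exist (otherwise the Python A raises IndexError).
def Pre_es_ciclo (data : List (List (Int × Int))) : Prop := 2 ≤ data.length
instance (data : List (List (Int × Int))) : Decidable (Pre_es_ciclo data) := by unfold Pre_es_ciclo; infer_instance
def pvWitness_es_ciclo : (List (List (Int × Int))) := [[(1, 2)], [(1, 2), (3, 1)]]

def Spec_es_ciclo (data : List (List (Int × Int))) (out : Bool) : Prop := out = es_ciclo_alt data
instance (data : List (List (Int × Int))) (out : Bool) : Decidable (Spec_es_ciclo data out) := by unfold Spec_es_ciclo; infer_instance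

-- ===== CLAIM (what is proved, stated in full; the proofs are below) =====
def Claim_equal_es_ciclo : Prop := ∀ (data : List (List (Int × Int))), Dom_es_ciclo data → Pre_es_ciclo data → Spec_es_ciclo data (es_ciclo data)

-- ===== LEMMAS AND PROOFS =====

-- A's inner loop scans k = j, j+1, … for xi = row[k].2 (stopping early), unless result is already true.
theorem esCicloInner_eq (row : List (Int × Int)) (xi : Int) :
    ∀ n j r, row.length - j = n →
      esCicloInner row xi j r
        = (r || decide (∃ k < row.length, j ≤ k ∧ xi = (row.getD k (0, 0)).2)) := by
  intro n
  induction n with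
  | zero =>
    intro j r h
    rw [esCicloInner]
    have hj : ¬ j < row.length := by omega
    simp [hj]
    intro k hk; omega
  | succ m ih =>
    intro j r h
    rw [esCicloInner]
    cases r with
    | true => simp
    | false =>
      have hj : j < row.length := by omega
      simp only [hj, and_self, dite_true, Bool.false_or]
      rw [ih (j + 1) _ (by omega)]
      by_cases he : xi = (row.getD j (0, 0)).2
      · have : ∃ k < row.length, j ≤ k ∧ xi = (row.getD k (0, 0)).2 :=
          ⟨j, hj, le_refl j, he⟩
        have hbe : (xi == (row.getD j (0, 0)).2) = true := by simp [he]
        simp only [hbe, Bool.true_or]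
        exact (decide_eq_true this).symm
      · have hne : (xi == (row.getD j (0, 0)).2) = false := by
          simp only [beq_eq_false_iff_ne, ne_eq]; exact he
        rw [hne]
        simp only [Bool.false_or]
        congr 1
        apply propext
        constructor
        · rintro ⟨k, hk1, hk2, hk3⟩; exact ⟨k, hk1, by omega, hk3⟩
        · rintro ⟨k, hk1, hk2, hk3⟩
          refine ⟨k, hk1, ?_, hk3⟩
          rcases Nat.eq_or_lt_of_le hk2 with rfl | h'
          · exact absurd hk3 he
          · omega

theorem foldl_or_any (g : Nat → Bool) :
    ∀ (l : List Nat) (r : Bool), l.foldl (fun r i => r || g i) r = (r || l.any g) := by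
  intro l
  induction l with
  | nil => intro r; simp
  | cons x xs ih => intro r; simp [List.foldl, ih, Bool.or_assoc]

-- characterisation of A on the row
theorem esCiclo_row_eq (row : List (Int × Int)) :
    (List.range row.length).foldl
        (fun result i => esCicloInner row ((row.getD i (0, 0)).1) (i + 1) result) false
      = true
    ↔ ∃ i < row.length, ∃ k < row.length, i + 1 ≤ k ∧
        (row.getD i (0, 0)).1 = (row.getD k (0, 0)).2 := by
  have hfe : (fun (result : Bool) (i : Nat) =>
        esCicloInner row ((row.getD i (0, 0)).1) (i + 1) result)
      = fun result i => result ||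
          decide (∃ k < row.length, i + 1 ≤ k ∧ (row.getD i (0, 0)).1 = (row.getD k (0, 0)).2) := by
    funext r i
    exact esCicloInner_eq row _ _ (i + 1) r rfl
  rw [hfe, foldl_or_any]
  simp [List.any_eq_true, List.mem_range]

-- characterisation of B's scan
theorem esCicloScan_iff (l : List (Int × Int)) :
    ∀ seen : PySem.Set Int,
      esCicloScan seen l = true
      ↔ ∃ j < l.length, ((l.getD j (0, 0)).2 ∈ seen ∨
          ∃ i < j, (l.getD i (0, 0)).1 = (l.getD j (0, 0)).2) := by
  induction l with
  | nil => intro seen; simp [esCicloScan]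
  | cons p rest ih =>
    intro seen
    obtain ⟨f, s⟩ := p
    rw [esCicloScan]
    by_cases hs : s ∈ seen
    · have : PySem.Set.contains seen s = true := by
        simp [PySem.Set.contains, hs]
      simp only [this, if_true]
      constructor
      · intro _; exact ⟨0, by simp, Or.inl (by simpa using hs)⟩
      · intro _; trivial
    · have : PySem.Set.contains seen s = false := by
        simp [PySem.Set.contains, hs]
      simp only [this, Bool.false_eq_true, if_false]
      rw [ih (PySem.Set.add seen f)]
      constructor
      · rintro ⟨j, hj, hcase⟩
        refine ⟨j + 1, by simpa using Nat.succ_lt_succ hj, ?_⟩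
        rcases hcase with hmem | ⟨i, hi, heq⟩
        · rw [PySem.Set.mem_add] at hmem
          rcases hmem with hmem | heqf
          · exact Or.inl (by simpa using hmem)
          · exact Or.inr ⟨0, Nat.succ_pos j, by simpa using heqf.symm⟩
        · exact Or.inr ⟨i + 1, Nat.succ_lt_succ hi, by simpa using heq⟩
      · rintro ⟨j, hj, hcase⟩
        cases j with
        | zero =>
          exfalso
          rcases hcase with hmem | ⟨i, hi, _⟩
          · exact hs (by simpa using hmem)
          · omega
        | succ j' =>
          refine ⟨j', by simpa using Nat.lt_of_succ_lt_succ hj, ?_⟩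
          rcases hcase with hmem | ⟨i, hi, heq⟩
          · exact Or.inl (by rw [PySem.Set.mem_add]; exact Or.inl (by simpa using hmem))
          · cases i with
            | zero =>
              refine Or.inl ?_
              rw [PySem.Set.mem_add]
              exact Or.inr (by simpa using heq.symm)
            | succ i' =>
              exact Or.inr ⟨i', Nat.lt_of_succ_lt_succ hi, by simpa using heq⟩

-- ===== VERDICT (by name: the statement is the Claim_ definition above) =====
theorem es_ciclo_spec : Claim_equal_es_ciclo := by
  intro data _ _
  unfold Spec_es_ciclo es_ciclo es_ciclo_alt
  cases hg : PySem.List.pyGet? data 1 with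
  | none => rfl
  | some row =>
    rw [Bool.eq_iff_iff, esCiclo_row_eq row, esCicloScan_iff row PySem.Set.empty]
    constructor
    · rintro ⟨i, hi, k, hk1, hk2, heq⟩
      exact ⟨k, hk1, Or.inr ⟨i, by omega, heq⟩⟩
    · rintro ⟨j, hj, hcase⟩
      rcases hcase with hmem | ⟨i, hij, heq⟩
      · simp [PySem.Set.empty] at hmem
      · exact ⟨i, by omega, j, hj, by omega, heq⟩
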